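-- pv_equiv track=rewrite | github.com/JinalShah2002/verify-ai | src/preprocessing.py | count_punc
-- ===== SOURCE A (Python) =====
-- def count_punc(essay:list) -> tuple[int,int,int,int]:
--     count_q = 0
--     count_ex = 0
--     count_semi = 0
--     count_col = 0
--
--     # Iterating through the tokenized essay
--     for token in essay:
--         if token == "?":
--             count_q += 1
--         elif token == "!":
--             count_ex += 1
--         elif token == ";":
--             count_semi += 1
--         elif token == ":":
--             count_col += 1
--
--     return count_q, count_ex,count_semi, count_col
-- ===== SOURCE B (Python) =====
-- def count_punc(essay: list) -> tuple[int, int, int, int]: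
--     return (essay.count("?"), essay.count("!"), essay.count(";"), essay.count(":"))
-- ===== Notes on version B (the rewrite author's own statement) =====
-- stated objective: idiomatic
-- what changed: Replaces the single manual pass with four branch accumulators by four independent list.count scans, one per punctuation token.
import Mathlib
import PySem

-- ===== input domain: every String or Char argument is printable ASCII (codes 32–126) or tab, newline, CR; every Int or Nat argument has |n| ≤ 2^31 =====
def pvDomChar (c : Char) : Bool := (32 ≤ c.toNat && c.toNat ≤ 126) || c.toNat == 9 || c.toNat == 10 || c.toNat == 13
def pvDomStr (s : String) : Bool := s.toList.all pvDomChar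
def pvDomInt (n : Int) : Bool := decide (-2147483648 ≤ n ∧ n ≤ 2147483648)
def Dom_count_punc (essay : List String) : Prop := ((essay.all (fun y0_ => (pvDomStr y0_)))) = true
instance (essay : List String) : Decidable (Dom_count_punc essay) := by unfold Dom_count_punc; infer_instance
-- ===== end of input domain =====

-- B replaces A's single manual pass with four branch accumulators by four list.count scans (idiomatic).


-- ===== PORT A =====
-- one pass, four accumulators, branch per token (literal transliteration of A's loop)
def count_punc (essay : List String) : Int × Int × Int × Int :=
  let st := essay.foldl
    (fun (acc : Int × Int × Int × Int) token =>
      let (count_q, count_ex, count_semi, count_col) := acc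
      if token == "?" then (count_q + 1, count_ex, count_semi, count_col)
      else if token == "!" then (count_q, count_ex + 1, count_semi, count_col)
      else if token == ";" then (count_q, count_ex, count_semi + 1, count_col)
      else if token == ":" then (count_q, count_ex, count_semi, count_col + 1)
      else acc)
    (0, 0, 0, 0)
  st

-- ===== PORT B =====
-- four independent list.count scans
def count_punc_alt (essay : List String) : Int × Int × Int × Int :=
  ((PySem.List.count essay "?" : Int), (PySem.List.count essay "!" : Int),
   (PySem.List.count essay ";" : Int), (PySem.List.count essay ":" : Int))

-- ===== PRECONDITION & SPEC =====
def Spec_count_punc (essay : List String) (out : Int × Int × Int × Int) : Prop := out = count_punc_alt essay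
instance (essay : List String) (out : Int × Int × Int × Int) : Decidable (Spec_count_punc essay out) := by unfold Spec_count_punc; infer_instance

-- ===== CLAIM (what is proved, stated in full; the proofs are below) =====
def Claim_equal_count_punc : Prop := ∀ (essay : List String), Dom_count_punc essay → Spec_count_punc essay (count_punc essay)

-- ===== LEMMAS AND PROOFS =====
-- the loop body of A's fold, in projection form (definitionally equal to the port's match-lambda)
def pvStep (acc : Int × Int × Int × Int) (token : String) : Int × Int × Int × Int :=
  if token == "?" then (acc.1 + 1, acc.2.1, acc.2.2.1, acc.2.2.2)
  else if token == "!" then (acc.1, acc.2.1 + 1, acc.2.2.1, acc.2.2.2)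
  else if token == ";" then (acc.1, acc.2.1, acc.2.2.1 + 1, acc.2.2.2)
  else if token == ":" then (acc.1, acc.2.1, acc.2.2.1, acc.2.2.2 + 1)
  else acc

-- loop invariant: the fold adds the four counts of the remaining list to the accumulator
lemma count_punc_fold (essay : List String) (a b c d : Int) :
    essay.foldl pvStep (a, b, c, d)
    = (a + essay.count "?", b + essay.count "!", c + essay.count ";", d + essay.count ":") := by
  induction essay generalizing a b c d with
  | nil => simp
  | cons t ts ih =>
      rw [List.foldl_cons]
      by_cases h1 : t = "?"
      · simp only [pvStep, h1]; simp [ih]; omega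
      · by_cases h2 : t = "!"
        · simp only [pvStep, h2]; simp [ih]; omega
        · by_cases h3 : t = ";"
          · simp only [pvStep, h3]; simp [ih]; omega
          · by_cases h4 : t = ":"
            · simp only [pvStep, h4]; simp [ih]; omega
            · simp only [pvStep]; simp [h1, h2, h3, h4, ih]

-- ===== VERDICT (by name: the statement is the Claim_ definition above) =====
theorem count_punc_spec : Claim_equal_count_punc := by
  intro essay _
  show count_punc essay = count_punc_alt essay
  have : count_punc essay = essay.foldl pvStep (0, 0, 0, 0) := rfl
  rw [this, count_punc_fold]
  simp [count_punc_alt, PySem.List.count_eq]
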